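-- pv_equiv track=rewrite | github.com/alvinwan/guide-to-hacking | tictactoe/puzzle.py | agent_basic
-- ===== SOURCE A (Python) =====
-- def get_empty_cells(moves):
--     for i in map(str, range(9)):
--         if i not in moves:
--             yield i
--
-- def get_winner(moves):
--     """
--     >>> get_winner('3065412')
--     0
--     """
--     player0 = ''.join(sorted(moves[::2]))
--     player1 = ''.join(sorted(moves[1::2]))
--     if is_winner(player0):
--         return 0
--     if is_winner(player1):
--         return 1
--     if len(moves) == 9:
--         return 2
--     return -1
--
-- def is_winner(moves):
--     moves = set(moves)
--     return any(all(move in moves for move in win) for win in (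
--         '012', '345', '678',  # horizontal
--         '036', '147', '258',  # vertical
--         '048', '246',  # diagonal
--     ))
--
-- def agent_basic(moves, recurse=True):
--     """
--     >>> list(agent_basic('4208531'))  # must pick 7 to stop playerO from win
--     ['7']
--     """
--     has_winning_move = False
--     for move in get_empty_cells(moves):
--         _moves = moves + move
--         if get_winner(_moves) > -1:
--             yield move  # take a winning move if there is one
--             has_winning_move = True
--     if has_winning_move:
--         return
--
--     if recurse:
--         # don't make any moves that immediately result in enemy victory
--         made_any_move = False
--         for move in get_empty_cells(moves):
--             _moves = moves + move
--             is_losing_move = False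
--             for _move in agent_basic(_moves, recurse=False):
--                 __moves = _moves + _move
--                 if -1 < get_winner(__moves) < 2:
--                     is_losing_move = True
--             if not is_losing_move:
--                 made_any_move = True
--                 yield move
--         if made_any_move:
--             return
--
--     # if all else fails, try all moves
--     yield from get_empty_cells(moves)
-- ===== SOURCE B (Python) =====
-- # Non-recursive reformulation: the recursive "opponent reply" probe collapses to a
-- # direct test "some opponent reply r makes get_winner(moves+m+r) 0 or 1".
-- LINES = ('012', '345', '678', '036', '147', '258', '048', '246')
--
--
-- def _wins(cells):
--     return any(all(c in cells for c in line) for line in LINES)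
--
--
-- def _winner(board):
--     if _wins(board[::2]):
--         return 0
--     if _wins(board[1::2]):
--         return 1
--     return 2 if len(board) == 9 else -1
--
--
-- def agent_basic(moves, recurse=True):
--     empties = [d for d in '012345678' if d not in moves]
--     winning = [m for m in empties if _winner(moves + m) > -1]
--     if winning:
--         yield from winning
--         return
--     if recurse:
--         safe = [m for m in empties
--                 if not any(0 <= _winner(moves + m + r) <= 1
--                            for r in '012345678' if r not in moves + m)]
--         if safe:
--             yield from safe
--             return
--     yield from empties
-- ===== Notes on version B (the rewrite author's own statement) =====
-- stated objective: simpler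
-- what changed: B removes the self-recursion entirely: instead of re-running agent_basic with recurse=False to enumerate opponent replies, it directly tests whether some empty reply cell makes get_winner return 0 or 1, and the generator/flag loops become three plain list comprehensions.
import Mathlib
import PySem

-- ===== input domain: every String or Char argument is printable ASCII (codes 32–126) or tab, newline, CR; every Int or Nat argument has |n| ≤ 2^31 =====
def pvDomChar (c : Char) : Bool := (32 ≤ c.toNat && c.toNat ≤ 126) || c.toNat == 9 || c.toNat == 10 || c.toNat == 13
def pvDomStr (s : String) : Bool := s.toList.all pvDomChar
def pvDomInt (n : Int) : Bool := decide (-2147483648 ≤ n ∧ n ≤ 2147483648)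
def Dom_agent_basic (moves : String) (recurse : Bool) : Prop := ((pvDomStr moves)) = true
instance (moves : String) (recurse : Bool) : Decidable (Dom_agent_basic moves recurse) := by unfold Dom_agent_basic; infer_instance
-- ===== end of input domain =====

-- B removes A's self-recursion (the opponent probe becomes a direct test); equal return value proved, both are generators whose full yield sequence is compared.
-- Python 1-character strings (board cells) are represented as Char internally; yields convert to String at the boundary.

-- ===== PORT A =====
-- get_empty_cells: for i in map(str, range(9)): if i not in moves: yield i   ('i not in moves' is substring test)
def pvEcA (b : List Char) : List String :=
  ((PySem.List.pyRange 0 9 1).map PySem.Int.toStr).filter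
    (fun i => !(PySem.Chars.isIn i.toList b))

-- is_winner(moves): set(moves), any(all(move in moves for move in win) for win in (…))
def pvIsWinnerA (moves : List Char) : Bool :=
  let s := PySem.Set.ofList moves
  (["012", "345", "678", "036", "147", "258", "048", "246"] : List String).any
    (fun win => win.toList.all (fun m => PySem.Set.contains s m))

-- get_winner: ''.join(sorted(moves[::2])) is the sorted char list (the join back to str is the identity under the Char-list representation)
def pvGetWinnerA (b : List Char) : Int :=
  let player0 := PySem.List.sorted ((PySem.List.slice? b none none 2).getD []) id false
  let player1 := PySem.List.sorted ((PySem.List.slice? b (some 1) none 2).getD []) id false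
  if pvIsWinnerA player0 then 0
  else if pvIsWinnerA player1 then 1
  else if b.length = 9 then 2
  else -1

-- agent_basic: generator loops become foldl over (flag, yields-so-far)
def pvAgentA (b : List Char) (recurse : Bool) : List String :=
  let phase1 := (pvEcA b).foldl (fun acc move =>
      let ms := b ++ move.toList
      if pvGetWinnerA ms > -1 then (true, acc.2 ++ [move]) else acc)
    ((false, []) : Bool × List String)
  if phase1.1 then phase1.2
  else
    match recurse with
    | true =>
      let phase2 := (pvEcA b).foldl (fun acc move =>
          let ms := b ++ move.toList
          let isLosing := (pvAgentA ms false).foldl (fun l mv =>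
              let mms := ms ++ mv.toList
              if -1 < pvGetWinnerA mms ∧ pvGetWinnerA mms < 2 then true else l) false
          if !isLosing then (true, acc.2 ++ [move]) else acc)
        ((false, []) : Bool × List String)
      if phase2.1 then phase2.2 else pvEcA b
    | false => pvEcA b
termination_by recurse.toNat
decreasing_by simp

def agent_basic (moves : String) (recurse : Bool) : List String :=
  pvAgentA moves.toList recurse

-- ===== PORT B =====
def pvLinesB : List (List Char) :=
  (["012", "345", "678", "036", "147", "258", "048", "246"] : List String).map String.toList

def pvWinsB (cells : List Char) : Bool :=
  pvLinesB.any (fun line => line.all (fun c => cells.contains c))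

def pvWinnerB (board : List Char) : Int :=
  if pvWinsB ((PySem.List.slice? board none none 2).getD []) then 0
  else if pvWinsB ((PySem.List.slice? board (some 1) none 2).getD []) then 1
  else if board.length = 9 then 2
  else -1

-- [d for d in '012345678' if d not in moves]  (d is a single char, so 'not in' is char membership)
def pvEmptiesB (b : List Char) : List Char :=
  "012345678".toList.filter (fun d => !(b.contains d))

def pvMk1 (c : Char) : String := String.ofList [c]

def pvAgentB (b : List Char) (recurse : Bool) : List String :=
  let empties := pvEmptiesB b
  let winning := empties.filter (fun m => pvWinnerB (b ++ [m]) > -1)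
  if winning ≠ [] then winning.map pvMk1
  else if recurse then
    let safe := empties.filter (fun m =>
      !((pvEmptiesB (b ++ [m])).any (fun r =>
        decide (0 ≤ pvWinnerB (b ++ [m] ++ [r]) ∧ pvWinnerB (b ++ [m] ++ [r]) ≤ 1))))
    if safe ≠ [] then safe.map pvMk1 else empties.map pvMk1
  else empties.map pvMk1

def agent_basic_alt (moves : String) (recurse : Bool) : List String :=
  pvAgentB moves.toList recurse

-- ===== PRECONDITION & SPEC =====
def Spec_agent_basic (moves : String) (recurse : Bool) (out : List String) : Prop := out = agent_basic_alt moves recurse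
instance (moves : String) (recurse : Bool) (out : List String) : Decidable (Spec_agent_basic moves recurse out) := by unfold Spec_agent_basic; infer_instance

-- ===== CLAIM (what is proved, stated in full; the proofs are below) =====
def Claim_equal_agent_basic : Prop := ∀ (moves : String) (recurse : Bool), Dom_agent_basic moves recurse → Spec_agent_basic moves recurse (agent_basic moves recurse)

-- ===== LEMMAS AND PROOFS =====

lemma pvIsIn_single (c : Char) (l : List Char) : PySem.Chars.isIn [c] l = l.contains c := by
  rw [Bool.eq_iff_iff, PySem.Chars.isIn_iff_infix, List.singleton_infix_iff]; simp

lemma pvEcA_eq (b : List Char) : pvEcA b = (pvEmptiesB b).map pvMk1 := by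
  unfold pvEcA pvEmptiesB
  rw [show (PySem.List.pyRange 0 9 1).map PySem.Int.toStr
        = ("012345678".toList).map pvMk1 from by decide]
  rw [List.filter_map]
  congr 1
  apply List.filter_congr
  intro c _
  show (!PySem.Chars.isIn (pvMk1 c).toList b) = (!b.contains c)
  rw [show (pvMk1 c).toList = [c] from by simp [pvMk1], pvIsIn_single]

lemma pvIsWinnerA_eq (cs : List Char) :
    pvIsWinnerA (PySem.List.sorted cs id false) = pvWinsB cs := by
  unfold pvIsWinnerA pvWinsB pvLinesB
  have hmem : ∀ m : Char,
      PySem.Set.contains (PySem.Set.ofList (PySem.List.sorted cs id false)) m = cs.contains m := by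
    intro m
    rw [Bool.eq_iff_iff, PySem.Set.contains_iff, PySem.Set.mem_ofList, PySem.List.mem_sorted]
    simp
  simp only [List.any_map, Function.comp_def, hmem]

lemma pvWinner_eq (b : List Char) : pvGetWinnerA b = pvWinnerB b := by
  unfold pvGetWinnerA pvWinnerB
  simp only []
  rw [pvIsWinnerA_eq, pvIsWinnerA_eq]

lemma pvFoldl_collect {α : Type} (p : α → Prop) [DecidablePred p] (xs : List α)
    (flag : Bool) (ys : List α) :
    xs.foldl (fun acc m => if p m then (true, acc.2 ++ [m]) else acc) (flag, ys)
      = (flag || xs.any (fun m => decide (p m)), ys ++ xs.filter (fun m => decide (p m))) := by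
  induction xs generalizing flag ys with
  | nil => simp
  | cons a t ih => by_cases h : p a <;> simp [List.foldl_cons, h, ih]

lemma pvFoldl_or {α : Type} (p : α → Prop) [DecidablePred p] (xs : List α) (flag : Bool) :
    xs.foldl (fun l m => if p m then true else l) flag
      = (flag || xs.any (fun m => decide (p m))) := by
  induction xs generalizing flag with
  | nil => simp
  | cons a t ih =>
    rw [List.foldl_cons]
    by_cases h : p a
    · rw [if_pos h, ih]; simp [h]
    · rw [if_neg h, ih]; simp [h]

lemma pvAny_eq_filter_ne {α : Type} (l : List α) (p : α → Bool) :
    l.any p = !(l.filter p).isEmpty := by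
  rw [Bool.eq_iff_iff]
  simp [List.any_eq_true, List.eq_nil_iff_forall_not_mem]

lemma pvWinFilter_eq (b : List Char) :
    (pvEcA b).filter (fun m => decide (pvGetWinnerA (b ++ m.toList) > -1))
      = ((pvEmptiesB b).filter (fun c => decide (pvWinnerB (b ++ [c]) > -1))).map pvMk1 := by
  rw [pvEcA_eq, List.filter_map]
  congr 1
  apply List.filter_congr
  intro c _
  show decide (pvGetWinnerA (b ++ (pvMk1 c).toList) > -1) = _
  rw [show (pvMk1 c).toList = [c] from by simp [pvMk1], pvWinner_eq]

lemma pvAgentA_false (b : List Char) : pvAgentA b false = pvAgentB b false := by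
  rw [pvAgentA]
  simp only []
  have hc := pvFoldl_collect (fun move : String => pvGetWinnerA (b ++ move.toList) > -1)
    (pvEcA b) false []
  rw [hc]
  unfold pvAgentB
  simp only [Bool.false_or, List.nil_append]
  rw [pvAny_eq_filter_ne, pvWinFilter_eq]
  by_cases h : (pvEmptiesB b).filter (fun c => decide (pvWinnerB (b ++ [c]) > -1)) = []
  · simp [h, pvEcA_eq]
  · simp [h]

lemma pvLosing_eq (bm : List Char) :
    (pvAgentA bm false).any
        (fun mv => decide (-1 < pvGetWinnerA (bm ++ mv.toList) ∧ pvGetWinnerA (bm ++ mv.toList) < 2))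
      = (pvEmptiesB bm).any
        (fun r => decide (0 ≤ pvWinnerB (bm ++ [r]) ∧ pvWinnerB (bm ++ [r]) ≤ 1)) := by
  rw [pvAgentA_false]
  unfold pvAgentB
  simp only [Bool.false_eq_true, if_false]
  by_cases hW : (pvEmptiesB bm).filter (fun m => decide (pvWinnerB (bm ++ [m]) > -1)) = []
  · rw [if_neg (by simp [hW])]
    rw [List.any_map]
    have hno : ∀ r ∈ pvEmptiesB bm, ¬ (pvWinnerB (bm ++ [r]) > -1) := by
      simpa [List.filter_eq_nil_iff] using hW
    rw [Bool.eq_iff_iff]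
    simp only [List.any_eq_true, Function.comp_def]
    constructor
    · rintro ⟨c, hc, hp⟩
      exact absurd hp (by simp [pvMk1, pvWinner_eq]; have := hno c hc; omega)
    · rintro ⟨r, hr, hp⟩
      exact absurd hp (by simp; have := hno r hr; omega)
  · rw [if_pos (by simp [hW])]
    rw [List.any_map, List.any_filter]
    refine List.any_congr rfl fun c => ?_
    rw [Bool.eq_iff_iff]
    simp [pvMk1, pvWinner_eq]
    omega

lemma pvSafeFilter_eq (b : List Char) :
    (pvEcA b).filter (fun m => !((pvEmptiesB (b ++ m.toList)).any (fun r =>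
        decide (0 ≤ pvWinnerB (b ++ m.toList ++ [r]) ∧ pvWinnerB (b ++ m.toList ++ [r]) ≤ 1))))
      = ((pvEmptiesB b).filter (fun c => !((pvEmptiesB (b ++ [c])).any (fun r =>
        decide (0 ≤ pvWinnerB (b ++ [c] ++ [r]) ∧ pvWinnerB (b ++ [c] ++ [r]) ≤ 1))))).map pvMk1 := by
  rw [pvEcA_eq, List.filter_map]
  congr 1
  apply List.filter_congr
  intro c _
  show (!((pvEmptiesB (b ++ (pvMk1 c).toList)).any (fun r =>
      decide (0 ≤ pvWinnerB (b ++ (pvMk1 c).toList ++ [r]) ∧ pvWinnerB (b ++ (pvMk1 c).toList ++ [r]) ≤ 1)))) = _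
  rw [show (pvMk1 c).toList = [c] from by simp [pvMk1]]

lemma pvAgent_eq (b : List Char) (recurse : Bool) : pvAgentA b recurse = pvAgentB b recurse := by
  cases recurse with
  | false => exact pvAgentA_false b
  | true =>
    rw [pvAgentA]
    simp only []
    have hc := pvFoldl_collect (fun move : String => pvGetWinnerA (b ++ move.toList) > -1)
      (pvEcA b) false []
    rw [hc]
    have hor : ∀ ms : List Char,
        ((pvAgentA ms false).foldl (fun l mv =>
          if -1 < pvGetWinnerA (ms ++ mv.toList) ∧ pvGetWinnerA (ms ++ mv.toList) < 2 then true else l) false)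
        = (pvEmptiesB ms).any (fun r => decide (0 ≤ pvWinnerB (ms ++ [r]) ∧ pvWinnerB (ms ++ [r]) ≤ 1)) := by
      intro ms
      have h1 := pvFoldl_or
        (fun mv : String => -1 < pvGetWinnerA (ms ++ mv.toList) ∧ pvGetWinnerA (ms ++ mv.toList) < 2)
        (pvAgentA ms false) false
      rw [h1, Bool.false_or]
      exact pvLosing_eq ms
    simp only [hor]
    have hc2 := pvFoldl_collect (fun move : String =>
      (!((pvEmptiesB (b ++ move.toList)).any (fun r =>
        decide (0 ≤ pvWinnerB (b ++ move.toList ++ [r]) ∧ pvWinnerB (b ++ move.toList ++ [r]) ≤ 1)))) = true)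
      (pvEcA b) false []
    rw [hc2]
    simp only [Bool.false_or, List.nil_append, Bool.decide_coe]
    rw [pvAny_eq_filter_ne, pvWinFilter_eq, pvAny_eq_filter_ne, pvSafeFilter_eq]
    unfold pvAgentB
    simp only []
    rw [pvEcA_eq]
    simp

-- ===== VERDICT (by name: the statement is the Claim_ definition above) =====
theorem agent_basic_spec : Claim_equal_agent_basic := by
  intro moves recurse _
  unfold Spec_agent_basic agent_basic agent_basic_alt
  exact pvAgent_eq moves.toList recurse
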